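-- pv_equiv track=rewrite | github.com/cgomez5609/RosalindProblems | src/rosalind_code/finding_a_shared_motif.py | get_shortest_string
-- ===== SOURCE A (Python) =====
-- def get_shortest_string(values):
--     a = None
--     length = 2000
--     for key, value in values.items():
--         if len(value) < length:
--             length = len(value)
--             a = key
--
--     b = None
--     length = 2000
--     for key, value in values.items():
--         if key != a:
--             if len(value) < length:
--                 length = len(value)
--                 b = key
--     return a, b
-- ===== SOURCE B (Python) =====
-- def get_shortest_string(values):
--     items = sorted(values.items(), key=lambda kv: len(kv[1]))
--     a = items[0][0] if len(items) > 0 and len(items[0][1]) < 2000 else None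
--     b = items[1][0] if len(items) > 1 and len(items[1][1]) < 2000 else None
--     return a, b
-- ===== Notes on version B (the rewrite author's own statement) =====
-- stated objective: simpler
-- what changed: Replaces the two repeated min-scan loops by one stable sort on value length followed by indexing the first two items (stability reproduces A's strict-< first-occurrence tie-breaking).
-- outside the precondition, e.g. on get_shortest_string({}): A returns (None, None), B returns (None, None); on get_shortest_string({'k': 'v'}): A returns ('k', None), B returns ('k', None)
import Mathlib
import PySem

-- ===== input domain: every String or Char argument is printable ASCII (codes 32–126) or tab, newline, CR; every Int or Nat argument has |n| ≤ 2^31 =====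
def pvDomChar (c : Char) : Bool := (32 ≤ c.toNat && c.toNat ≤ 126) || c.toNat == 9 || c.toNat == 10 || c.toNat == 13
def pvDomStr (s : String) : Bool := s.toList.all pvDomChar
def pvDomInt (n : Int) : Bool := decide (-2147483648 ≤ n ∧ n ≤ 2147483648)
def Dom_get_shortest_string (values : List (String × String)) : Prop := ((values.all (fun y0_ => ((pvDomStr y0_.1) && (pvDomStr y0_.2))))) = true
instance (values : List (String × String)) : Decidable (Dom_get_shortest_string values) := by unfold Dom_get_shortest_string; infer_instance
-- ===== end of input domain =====

-- B replaces A's two repeated min-scan loops by one stable sort on value length and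
-- indexing the first two items (simpler; sort stability matches A's strict-< tie-breaking).
-- Python returns None components outside Pre_; under Pre_ both components are real strings
-- (the ports use Option internally and `getD ""` only as the out-of-Pre_ placeholder).

-- ===== PORT A =====
def get_shortest_string (values : List (String × String)) : String × String :=
  -- first loop: a = None; length = 2000; strict-< scan
  let st1 := values.foldl (fun (st : Option String × Int) kv =>
      if (kv.2.length : Int) < st.2 then (some kv.1, (kv.2.length : Int)) else st)
    (none, 2000)
  let a := st1.1
  -- second loop: same scan, skipping key == a
  let st2 := values.foldl (fun (st : Option String × Int) kv =>
      if some kv.1 ≠ a then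
        (if (kv.2.length : Int) < st.2 then (some kv.1, (kv.2.length : Int)) else st)
      else st)
    (none, 2000)
  (a.getD "", st2.1.getD "")

-- ===== PORT B =====
def get_shortest_string_alt (values : List (String × String)) : String × String :=
  let items := PySem.List.sorted values (fun kv => (kv.2.length : Int)) false
  let a : Option String := match items with
    | kv0 :: _ => if (kv0.2.length : Int) < 2000 then some kv0.1 else none
    | [] => none
  let b : Option String := match items with
    | _ :: kv1 :: _ => if (kv1.2.length : Int) < 2000 then some kv1.1 else none
    | _ => none
  (a.getD "", b.getD "")

-- ===== PRECONDITION & SPEC =====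
-- Pre_ excludes (i) inputs with fewer than two values of length < 2000, on which Python A
-- returns None (not a String) for a and/or b, and (ii) duplicate keys, which a Python dict
-- (the actual argument type of A) cannot contain.
def Pre_get_shortest_string (values : List (String × String)) : Prop :=
  (values.map Prod.fst).Nodup ∧ 2 ≤ (values.filter (fun kv => kv.2.length < 2000)).length
instance (values : List (String × String)) : Decidable (Pre_get_shortest_string values) := by
  unfold Pre_get_shortest_string; infer_instance
def pvWitness_get_shortest_string : (List (String × String)) := [("a", "xx"), ("b", "y")]

def Spec_get_shortest_string (values : List (String × String)) (out : String × String) : Prop := out = get_shortest_string_alt values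
instance (values : List (String × String)) (out : String × String) : Decidable (Spec_get_shortest_string values out) := by unfold Spec_get_shortest_string; infer_instance

-- ===== CLAIM (what is proved, stated in full; the proofs are below) =====
def Claim_equal_get_shortest_string : Prop := ∀ (values : List (String × String)), Dom_get_shortest_string values → Pre_get_shortest_string values → Spec_get_shortest_string values (get_shortest_string values)

-- ===== LEMMAS AND PROOFS =====

-- the sort key of both ports
def pvKey (kv : String × String) : Int := (kv.2.length : Int)

-- A's strict-< update step
def pvStep (st : Option String × Int) (kv : String × String) : Option String × Int :=
  if pvKey kv < st.2 then (some kv.1, pvKey kv) else st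

-- A's loop state as a function of the head of the (partially) sorted list
def pvStOf (o : Option (String × String)) : Option String × Int :=
  match o with
  | none => (none, 2000)
  | some h => if pvKey h < 2000 then (some h.1, pvKey h) else (none, 2000)

def pvIns (x : String × String) (acc : List (String × String)) : List (String × String) :=
  PySem.List.insertBy (fun a b => decide (pvKey a < pvKey b)) x acc

theorem pvIns_head? (x : String × String) (acc : List (String × String)) :
    (pvIns x acc).head? =
      some (match acc.head? with
            | none => x
            | some h => if pvKey x < pvKey h then x else h) := by
  cases acc with
  | nil => rfl
  | cons y ys =>
    simp only [pvIns, PySem.List.insertBy, List.head?]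
    by_cases h : pvKey x < pvKey y <;> simp [h]

theorem pvStep_stOf (acc : List (String × String)) (x : String × String) :
    pvStep (pvStOf acc.head?) x = pvStOf ((pvIns x acc).head?) := by
  rw [pvIns_head?]
  cases acc with
  | nil => simp [pvStOf, pvStep]
  | cons h t =>
    simp only [List.head?, pvStOf, pvStep]
    split_ifs <;> first | rfl | (exfalso; omega)

theorem pvLoop1_eq (l : List (String × String)) :
    ∀ (acc : List (String × String)),
      l.foldl pvStep (pvStOf acc.head?) =
        pvStOf ((l.foldl (fun a x => pvIns x a) acc).head?) := by
  induction l with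
  | nil => intro acc; rfl
  | cons x t ih =>
    intro acc
    simp only [List.foldl_cons]
    rw [pvStep_stOf acc x]
    exact ih (pvIns x acc)

theorem pvIns_of_lt_all (x : String × String) (m : List (String × String))
    (h : ∀ z ∈ m, pvKey x < pvKey z) : pvIns x m = x :: m := by
  cases m with
  | nil => rfl
  | cons y ys =>
    simp only [pvIns, PySem.List.insertBy]
    have : pvKey x < pvKey y := h y (by simp)
    simp [this]

theorem pvMem_ins (z x : String × String) (acc : List (String × String)) :
    z ∈ pvIns x acc ↔ z = x ∨ z ∈ acc := by
  simpa [pvIns] using PySem.List.mem_insertBy (before := fun a b => decide (pvKey a < pvKey b))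
    (x := x) (ys := acc) (y := z)

theorem pvPairwise_ins (x : String × String) (acc : List (String × String))
    (h : acc.Pairwise (fun u v => pvKey u ≤ pvKey v)) :
    (pvIns x acc).Pairwise (fun u v => pvKey u ≤ pvKey v) := by
  induction acc with
  | nil => simp [pvIns, PySem.List.insertBy]
  | cons y ys ih =>
    rcases List.pairwise_cons.mp h with ⟨hy, hys⟩
    simp only [pvIns, PySem.List.insertBy]
    by_cases hxy : pvKey x < pvKey y
    · simp only [hxy, decide_true, if_true]
      refine List.pairwise_cons.mpr ⟨?_, h⟩
      intro z hz
      rcases List.mem_cons.mp hz with rfl | hz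
      · exact le_of_lt hxy
      · exact le_of_lt (lt_of_lt_of_le hxy (hy z hz))
    · simp only [hxy, decide_false, Bool.false_eq_true, if_false]
      refine List.pairwise_cons.mpr ⟨?_, ih hys⟩
      intro z hz
      rcases (pvMem_ins z x ys).mp hz with rfl | hz
      · omega
      · exact hy z hz

theorem pvIns_filter (p : String × String → Bool) (x : String × String)
    (acc : List (String × String))
    (hs : acc.Pairwise (fun u v => pvKey u ≤ pvKey v)) :
    (pvIns x acc).filter p = if p x then pvIns x (acc.filter p) else acc.filter p := by
  induction acc with
  | nil => cases hpx : p x <;> simp [pvIns, PySem.List.insertBy, List.filter, hpx]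
  | cons y ys ih =>
    rcases List.pairwise_cons.mp hs with ⟨hy, hys⟩
    simp only [pvIns, PySem.List.insertBy]
    by_cases hxy : pvKey x < pvKey y
    · simp only [hxy, decide_true, if_true]
      cases hpx : p x
      · simp [List.filter, hpx]
      · have hall : ∀ z ∈ (y :: ys).filter p, pvKey x < pvKey z := by
          intro z hz
          have hzmem := List.mem_of_mem_filter hz
          rcases List.mem_cons.mp hzmem with rfl | hz'
          · exact hxy
          · exact lt_of_lt_of_le hxy (hy z hz')
        have hins := pvIns_of_lt_all x ((y :: ys).filter p) hall
        simp only [pvIns] at hins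
        rw [if_pos rfl, hins]
        simp [List.filter, hpx]
    · simp only [hxy, decide_false, Bool.false_eq_true, if_false]
      have ihys := ih hys
      cases hpx : p x <;> cases hpy : p y <;>
        simp_all [List.filter, pvIns, PySem.List.insertBy]

theorem pvFoldl_ins_filter (p : String × String → Bool) (l : List (String × String)) :
    ∀ (acc : List (String × String)),
      acc.Pairwise (fun u v => pvKey u ≤ pvKey v) →
      (l.foldl (fun a x => pvIns x a) acc).filter p =
        (l.filter p).foldl (fun a x => pvIns x a) (acc.filter p) := by
  induction l with
  | nil => intro acc _; rfl
  | cons x t ih =>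
    intro acc hs
    simp only [List.foldl_cons, List.filter]
    rw [ih (pvIns x acc) (pvPairwise_ins x acc hs)]
    rw [pvIns_filter p x acc hs]
    cases hpx : p x <;> simp

-- the sorted list of both ports, in foldl-insertBy form
theorem pvSorted_eq (values : List (String × String)) :
    PySem.List.sorted values (fun kv => (kv.2.length : Int)) false =
      values.foldl (fun a x => pvIns x a) [] := rfl

-- A's first loop computes pvStOf of the sorted head
theorem pvLoopA1 (values : List (String × String)) :
    values.foldl (fun (st : Option String × Int) kv =>
        if (kv.2.length : Int) < st.2 then (some kv.1, (kv.2.length : Int)) else st)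
      (none, 2000) =
    pvStOf (PySem.List.sorted values (fun kv => (kv.2.length : Int)) false).head? := by
  have h := pvLoop1_eq values []
  simpa [pvStep, pvStOf, pvKey, pvSorted_eq] using h

-- guarded loop = plain loop over the filtered list
theorem pvLoopA2_filter (values : List (String × String)) (a : Option String) :
    ∀ (init : Option String × Int),
    values.foldl (fun (st : Option String × Int) kv =>
        if some kv.1 ≠ a then
          (if (kv.2.length : Int) < st.2 then (some kv.1, (kv.2.length : Int)) else st)
        else st)
      init =
    (values.filter (fun kv => some kv.1 ≠ a)).foldl (fun (st : Option String × Int) kv =>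
        if (kv.2.length : Int) < st.2 then (some kv.1, (kv.2.length : Int)) else st)
      init := by
  induction values with
  | nil => intro init; rfl
  | cons x t ih =>
    intro init
    simp only [List.foldl_cons, List.filter_cons]
    by_cases hx : some x.1 ≠ a
    · have hdx : decide (some x.1 ≠ a) = true := by simpa using hx
      rw [if_pos hx, hdx, if_pos rfl, List.foldl_cons]
      exact ih _
    · have hdx : decide (some x.1 ≠ a) = false := by simpa using hx
      rw [if_neg hx, hdx]
      simp only [Bool.false_eq_true, if_false]
      exact ih _

theorem get_shortest_string_spec : Claim_equal_get_shortest_string := by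
  unfold Claim_equal_get_shortest_string
  intro values _hdom hpre
  obtain ⟨hnodup, hlen⟩ := hpre
  unfold Spec_get_shortest_string
  -- the sorted list is nonempty (Pre_ gives at least two short entries)
  have hne : values ≠ [] := by
    intro h; rw [h] at hlen; simp at hlen
  have hsne : PySem.List.sorted values (fun kv => (kv.2.length : Int)) false ≠ [] := by
    intro h
    exact hne ((PySem.List.sorted_eq_nil_iff _ _ _).mp h)
  obtain ⟨m, t, hmt⟩ := List.exists_cons_of_ne_nil hsne
  -- the head's length is < 2000: Pre_ gives some value of length < 2000
  have hshort : ∃ x ∈ values, x.2.length < 2000 := by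
    have hfne : (values.filter (fun kv => kv.2.length < 2000)) ≠ [] := by
      intro h; rw [h] at hlen; simp at hlen
    obtain ⟨x, hx⟩ := List.exists_mem_of_ne_nil _ hfne
    exact ⟨x, List.mem_of_mem_filter hx, by
      have := List.of_mem_filter hx; simpa using this⟩
  obtain ⟨x0, hx0mem, hx0len⟩ := hshort
  have hmle : (m.2.length : Int) ≤ (x0.2.length : Int) := by
    have := PySem.List.key_head_sorted_le (xs := values)
      (key := fun kv => (kv.2.length : Int)) (m := m) (t := t) hmt x0 hx0mem
    simpa using this
  have hm2000 : pvKey m < 2000 := by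
    unfold pvKey; omega
  -- A's first loop computes (some m.1, |m.2|)
  have ha1 : values.foldl (fun (st : Option String × Int) kv =>
      if (kv.2.length : Int) < st.2 then (some kv.1, (kv.2.length : Int)) else st)
      (none, 2000) = (some m.1, pvKey m) := by
    rw [pvLoopA1 values, hmt]
    simp [pvStOf, hm2000]
  -- the filter of the sorted list by key ≠ m.1 is exactly its tail
  have hkeysnodup : ((PySem.List.sorted values (fun kv => (kv.2.length : Int)) false).map
      Prod.fst).Nodup := by
    have hperm := PySem.List.sorted_perm values (fun kv => (kv.2.length : Int)) false
    exact ((hperm.map Prod.fst).nodup_iff).mpr hnodup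
  have hfilter_s : (PySem.List.sorted values (fun kv => (kv.2.length : Int)) false).filter
      (fun kv => some kv.1 ≠ some m.1) = t := by
    rw [hmt]
    rw [hmt] at hkeysnodup
    simp only [List.map_cons, List.nodup_cons] at hkeysnodup
    rw [List.filter_cons, if_neg (by simp)]
    apply List.filter_eq_self.mpr
    intro z hz
    have hzk : z.1 ≠ m.1 := by
      intro h
      exact hkeysnodup.1 (by rw [← h]; exact List.mem_map_of_mem hz)
    simp [hzk]
  -- filter commutes with the stable insertion sort
  have hfc := pvFoldl_ins_filter (fun kv => decide (some kv.1 ≠ some m.1)) values [] (by simp)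
  simp only [List.filter_nil] at hfc
  -- A's second loop computes pvStOf of the sorted tail's head
  have ha2 : values.foldl (fun (st : Option String × Int) kv =>
      if some kv.1 ≠ some m.1 then
        (if (kv.2.length : Int) < st.2 then (some kv.1, (kv.2.length : Int)) else st)
      else st)
      (none, 2000) = pvStOf t.head? := by
    rw [pvLoopA2_filter values (some m.1) (none, 2000)]
    have hgen := pvLoop1_eq (values.filter (fun kv => some kv.1 ≠ some m.1)) []
    have hfoldsort : (values.filter (fun kv => some kv.1 ≠ some m.1)).foldl
        (fun a x => pvIns x a) [] = t := by
      rw [← hfc]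
      exact hfilter_s
    rw [show (List.filter (fun kv => decide (some kv.1 ≠ some m.1)) values) =
        (values.filter (fun kv => some kv.1 ≠ some m.1)) from rfl] at hgen ⊢
    rw [hfoldsort] at hgen
    simpa [pvStep, pvStOf, pvKey] using hgen
  -- assemble both sides
  simp only [get_shortest_string, get_shortest_string_alt, hmt]
  rw [ha1]
  simp only []
  rw [ha2]
  have hm' : m.2.length < 2000 := by unfold pvKey at hm2000; omega
  cases t with
  | nil => simp [pvStOf, hm']
  | cons kv1 t' =>
    simp only [pvStOf, List.head?, pvKey]
    by_cases h1 : (kv1.2.length : Int) < 2000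
    · simp [h1, hm']
    · have h1' : ¬ kv1.2.length < 2000 := by omega
      simp [h1, hm']
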